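-- pv_equiv track=rewrite | github.com/crazypurpleunicorn/webScrapingWithBeautifulSoupAndSelenium | functions.py | returnListOfAllLinksOfPropertySearchWebsitesGivenANumber
-- ===== SOURCE A (Python) =====
-- def returnListOfAllLinksOfPropertySearchWebsitesGivenANumber(numberOfLinksInTheList):
--     listOfLinks = []
--     initialUrl = url = 'https://www.firstmallorca.com/en/search'
--     i = 1
--
--     while i <= numberOfLinksInTheList:
--         listOfLinks.append(initialUrl)
--         if i == 1:
--             initialUrl = initialUrl + '/' + str(i)
--         else:
--             initialUrl = initialUrl.replace(str(i - 1), str(i))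
--         i = i + 1
--     return listOfLinks
-- ===== SOURCE B (Python) =====
-- def returnListOfAllLinksOfPropertySearchWebsitesGivenANumber(numberOfLinksInTheList):
--     base = 'https://www.firstmallorca.com/en/search'
--     if numberOfLinksInTheList < 1:
--         return []
--     return [base] + ['%s/%d' % (base, k) for k in range(1, numberOfLinksInTheList)]
-- ===== Notes on version B (the rewrite author's own statement) =====
-- stated objective: simpler
-- what changed: B replaces A's stateful while-loop that mutates a running URL via str.replace with a direct closed-form construction: the base URL followed by a comprehension formatting base/k for k in range(1, n).
import Mathlib
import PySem

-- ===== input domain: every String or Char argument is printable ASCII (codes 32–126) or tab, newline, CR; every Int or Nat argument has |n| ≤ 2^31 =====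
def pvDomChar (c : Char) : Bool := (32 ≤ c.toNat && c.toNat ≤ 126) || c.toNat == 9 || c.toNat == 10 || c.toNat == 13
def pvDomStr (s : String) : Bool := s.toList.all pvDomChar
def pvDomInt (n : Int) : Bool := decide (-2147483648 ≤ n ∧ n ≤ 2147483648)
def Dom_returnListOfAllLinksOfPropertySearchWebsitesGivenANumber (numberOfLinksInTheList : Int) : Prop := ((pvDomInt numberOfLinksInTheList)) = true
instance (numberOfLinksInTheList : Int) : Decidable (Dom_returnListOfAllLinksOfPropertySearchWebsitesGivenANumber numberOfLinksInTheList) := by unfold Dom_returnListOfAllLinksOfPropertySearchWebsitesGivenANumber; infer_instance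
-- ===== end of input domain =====

-- ===== PORT A =====
-- B changes only the construction of the same list (closed-form per-element build instead of a
-- mutating while-loop with str.replace); return values proved equal on all of Dom.

-- while-loop of A: append current url, then update it (concat at i=1, digit replace afterwards)
def pvALoop (n : Int) (i : Int) (initialUrl : String) (acc : List String) : List String :=
  if i ≤ n then
    pvALoop n (i + 1)
      (if i = 1 then initialUrl ++ "/" ++ PySem.Int.toStr i
       else PySem.Str.replace initialUrl (PySem.Int.toStr (i - 1)) (PySem.Int.toStr i))
      (acc ++ [initialUrl])
  else acc
termination_by (n + 1 - i).toNat
decreasing_by omega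

def returnListOfAllLinksOfPropertySearchWebsitesGivenANumber (numberOfLinksInTheList : Int) : List String :=
  pvALoop numberOfLinksInTheList 1 "https://www.firstmallorca.com/en/search" []

-- ===== PORT B =====
def returnListOfAllLinksOfPropertySearchWebsitesGivenANumber_alt (numberOfLinksInTheList : Int) : List String :=
  if numberOfLinksInTheList < 1 then []
  else ["https://www.firstmallorca.com/en/search"] ++
    (PySem.List.pyRange 1 numberOfLinksInTheList 1).map
      (fun k => "https://www.firstmallorca.com/en/search" ++ "/" ++ PySem.Int.toStr k)

-- ===== PRECONDITION & SPEC =====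
def Spec_returnListOfAllLinksOfPropertySearchWebsitesGivenANumber (numberOfLinksInTheList : Int) (out : List String) : Prop := out = returnListOfAllLinksOfPropertySearchWebsitesGivenANumber_alt numberOfLinksInTheList
instance (numberOfLinksInTheList : Int) (out : List String) : Decidable (Spec_returnListOfAllLinksOfPropertySearchWebsitesGivenANumber numberOfLinksInTheList out) := by unfold Spec_returnListOfAllLinksOfPropertySearchWebsitesGivenANumber; infer_instance

-- ===== CLAIM (what is proved, stated in full; the proofs are below) =====
def Claim_equal_returnListOfAllLinksOfPropertySearchWebsitesGivenANumber : Prop := ∀ (numberOfLinksInTheList : Int), Dom_returnListOfAllLinksOfPropertySearchWebsitesGivenANumber numberOfLinksInTheList → Spec_returnListOfAllLinksOfPropertySearchWebsitesGivenANumber numberOfLinksInTheList (returnListOfAllLinksOfPropertySearchWebsitesGivenANumber numberOfLinksInTheList)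

-- ===== LEMMAS AND PROOFS =====

lemma pv_go_nil (old new acc : List Char) (fuel : Nat) :
    PySem.Chars.replace.go old new fuel [] acc = acc.reverse := by
  cases fuel <;> simp [PySem.Chars.replace.go]

lemma pv_toDigitsCore_ne_nil (fuel n : Nat) (ds : List Char) :
    Nat.toDigitsCore 10 (fuel + 1) n ds ≠ [] := by
  induction fuel generalizing n ds with
  | zero =>
      rw [Nat.toDigitsCore]; split
      · simp
      · rw [Nat.toDigitsCore]; simp
  | succ f ih => rw [Nat.toDigitsCore]; split; · simp
                 · exact ih _ _

lemma pv_mem_toDigitsCore_digit (fuel : Nat) : ∀ (n : Nat) (ds : List Char) (c : Char),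
    c ∈ Nat.toDigitsCore 10 fuel n ds → c ∈ ds ∨ c.isDigit := by
  induction fuel with
  | zero => intro n ds c hc; rw [Nat.toDigitsCore] at hc; exact Or.inl hc
  | succ f ih =>
      intro n ds c hc
      rw [Nat.toDigitsCore] at hc
      have hdig : (n % 10).digitChar.isDigit := by
        have hall : ∀ m : Nat, m < 10 → (Nat.digitChar m).isDigit := by decide
        exact hall _ (Nat.mod_lt _ (by omega))
      split at hc
      · rcases List.mem_cons.mp hc with h | h
        · exact Or.inr (h ▸ hdig)
        · exact Or.inl h
      · rcases ih _ _ _ hc with h | h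
        · rcases List.mem_cons.mp h with h | h
          · exact Or.inr (h ▸ hdig)
          · exact Or.inl h
        · exact Or.inr h

lemma pv_toChars_pos (m : Int) (hm : 1 ≤ m) :
    ∃ d rest, PySem.Int.toChars m = d :: rest ∧ ∀ c ∈ (d :: rest), c.isDigit := by
  have hneg : ¬ m < 0 := by omega
  have : PySem.Int.toChars m = Nat.toDigits 10 m.toNat := by
    simp [PySem.Int.toChars, hneg]
  rw [this, Nat.toDigits]
  rcases h : Nat.toDigitsCore 10 (m.toNat + 1) m.toNat [] with _ | ⟨d, rest⟩
  · exact absurd h (pv_toDigitsCore_ne_nil _ _ _)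
  · refine ⟨d, rest, rfl, ?_⟩
    intro c hc
    have := pv_mem_toDigitsCore_digit (m.toNat + 1) m.toNat [] c (h ▸ hc)
    simpa using this

lemma pv_go_spec (new : List Char) (d : Char) (old' : List Char) :
    ∀ (pre : List Char) (fuel : Nat) (acc : List Char),
    (∀ c ∈ pre, c ≠ d) → pre.length + (d :: old').length ≤ fuel →
    PySem.Chars.replace.go (d :: old') new fuel (pre ++ d :: old') acc
      = acc.reverse ++ pre ++ new := by
  intro pre
  induction pre with
  | nil =>
      intro fuel acc _ hfuel
      obtain ⟨f, rfl⟩ : ∃ f, fuel = f + 1 := ⟨fuel - 1, by simp at hfuel; omega⟩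
      rw [PySem.Chars.replace.go.eq_def]
      have hp : (d :: old').isPrefixOf (d :: old') = true := by
        simp [List.isPrefixOf_iff_prefix]
      simp only [List.nil_append, hp, if_true, List.length_cons,
        List.drop_succ_cons, List.drop_length, pv_go_nil]
      simp
  | cons c pre' ih =>
      intro fuel acc hne hfuel
      obtain ⟨f, rfl⟩ : ∃ f, fuel = f + 1 := ⟨fuel - 1, by simp at hfuel; omega⟩
      have hcd : c ≠ d := hne c (by simp)
      rw [PySem.Chars.replace.go.eq_def]
      simp only [List.cons_append, List.isPrefixOf]
      have : (d == c) = false := by simp [Ne.symm hcd]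
      simp only [this, Bool.false_and, Bool.false_eq_true, if_false]
      rw [ih f (c :: acc) (fun x hx => hne x (by simp [hx])) (by simp at hfuel ⊢; omega)]
      simp

lemma pv_replace_suffix (pre old new : List Char) (d : Char) (old' : List Char)
    (ho : old = d :: old') (hne : ∀ c ∈ pre, c ≠ d) :
    PySem.Chars.replace (pre ++ old) old new = pre ++ new := by
  subst ho
  rw [PySem.Chars.replace]
  simp only [List.isEmpty_cons, Bool.false_eq_true, if_false]
  rw [pv_go_spec new d old' pre (pre ++ d :: old').length [] hne (by simp)]
  simp

set_option maxRecDepth 20000 in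
lemma pv_no_digit :
    (("https://www.firstmallorca.com/en/search".toList ++ "/".toList).all (fun c => !c.isDigit)) = true := by
  decide

lemma pv_step (i : Int) (h2 : 2 ≤ i) :
    PySem.Str.replace ("https://www.firstmallorca.com/en/search" ++ "/" ++ PySem.Int.toStr (i - 1))
        (PySem.Int.toStr (i - 1)) (PySem.Int.toStr i)
      = "https://www.firstmallorca.com/en/search" ++ "/" ++ PySem.Int.toStr i := by
  obtain ⟨d, rest, hchars, hdig⟩ := pv_toChars_pos (i - 1) (by omega)
  apply String.toList_inj.mp
  rw [PySem.Str.toList_replace]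
  simp only [String.toList_append, PySem.Int.toList_toStr]
  have hpre : ∀ c ∈ ("https://www.firstmallorca.com/en/search".toList ++ "/".toList), c ≠ d := by
    intro c hc
    have hnd : ¬ c.isDigit := by
      have := List.all_eq_true.mp pv_no_digit c hc
      simpa using this
    intro h; exact hnd (h ▸ hdig d (by simp))
  calc PySem.Chars.replace
        ("https://www.firstmallorca.com/en/search".toList ++ "/".toList ++ PySem.Int.toChars (i - 1))
        (PySem.Int.toChars (i - 1)) (PySem.Int.toChars i)
      = ("https://www.firstmallorca.com/en/search".toList ++ "/".toList) ++ PySem.Int.toChars i := by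
        rw [pv_replace_suffix _ _ _ d rest hchars hpre]
    _ = _ := by simp

lemma pv_loop_inv (n : Int) (k : Nat) : ∀ (i : Int) (acc : List String), 2 ≤ i → (n + 1 - i).toNat = k →
    pvALoop n i ("https://www.firstmallorca.com/en/search" ++ "/" ++ PySem.Int.toStr (i - 1)) acc
      = acc ++ (PySem.List.pyRange (i - 1) n 1).map
          (fun j => "https://www.firstmallorca.com/en/search" ++ "/" ++ PySem.Int.toStr j) := by
  induction k with
  | zero =>
      intro i acc h2 hk
      have hle : ¬ i ≤ n := by omega
      rw [pvALoop, if_neg hle, PySem.List.pyRange_one_eq_nil (by omega)]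
      simp
  | succ k ih =>
      intro i acc h2 hk
      by_cases hle : i ≤ n
      · rw [pvALoop, if_pos hle, if_neg (by omega : ¬ i = 1), pv_step i h2]
        have : ("https://www.firstmallorca.com/en/search" ++ "/" ++ PySem.Int.toStr i)
            = ("https://www.firstmallorca.com/en/search" ++ "/" ++ PySem.Int.toStr (i + 1 - 1)) := by
          norm_num
        rw [this, ih (i + 1) _ (by omega) (by omega)]
        rw [PySem.List.pyRange_one_cons (by omega : i - 1 < n)]
        simp [add_sub_cancel_right]
      · rw [pvALoop, if_neg hle, PySem.List.pyRange_one_eq_nil (by omega)]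
        simp

-- ===== VERDICT (by name: the statement is the Claim_ definition above) =====
theorem returnListOfAllLinksOfPropertySearchWebsitesGivenANumber_spec : Claim_equal_returnListOfAllLinksOfPropertySearchWebsitesGivenANumber := by
  intro n _
  unfold Spec_returnListOfAllLinksOfPropertySearchWebsitesGivenANumber
  unfold returnListOfAllLinksOfPropertySearchWebsitesGivenANumber
  unfold returnListOfAllLinksOfPropertySearchWebsitesGivenANumber_alt
  by_cases hn : n < 1
  · rw [pvALoop, if_neg (by omega : ¬ (1:Int) ≤ n), if_pos hn]
  · rw [if_neg hn]
    rw [pvALoop, if_pos (by omega : (1:Int) ≤ n), if_pos rfl]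
    have h1 : PySem.Int.toStr (1 : Int) = PySem.Int.toStr ((2:Int) - 1) := by norm_num
    rw [h1]
    have hinv := pv_loop_inv n (n - 1).toNat 2
      ["https://www.firstmallorca.com/en/search"] (by omega) (by omega)
    norm_num at hinv ⊢
    exact hinv
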